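-- pv_equiv track=rewrite | github.com/wd1/gooImgsearch | summarize.py | getSentenceValue
-- ===== SOURCE A (Python) =====
-- def getSentenceValue(sentences,freqTable):
--     sentenceValue = dict()
--
--     for sentence in sentences:
--         for word, freq in freqTable.items():
--             if word in sentence.lower():
--                 if sentence in sentenceValue:
--                     sentenceValue[sentence] += freq
--                 else:
--                     sentenceValue[sentence] = freq
--     return sentenceValue
-- ===== SOURCE B (Python) =====
-- def getSentenceValue(sentences, freqTable):
--     # Count occurrences of each sentence (first-occurrence order), lower each
--     # distinct sentence once, and write each result with a single dict store.
--     counts = {}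
--     for s in sentences:
--         counts[s] = counts.get(s, 0) + 1
--     sentenceValue = {}
--     for s, c in counts.items():
--         low = s.lower()
--         matched = [freq for word, freq in freqTable.items() if word in low]
--         if matched:
--             sentenceValue[s] = sum(matched) * c
--     return sentenceValue
-- ===== Notes on version B (the rewrite author's own statement) =====
-- stated objective: alternative
-- what changed: B first builds an occurrence-count dict of the sentences, then for each DISTINCT sentence lowers it once and scans the frequency table once, writing count*sum with a single dict store, instead of A's per-occurrence inner loop that re-lowers the sentence for every table word and updates the dict once per matching word.
import Mathlib
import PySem

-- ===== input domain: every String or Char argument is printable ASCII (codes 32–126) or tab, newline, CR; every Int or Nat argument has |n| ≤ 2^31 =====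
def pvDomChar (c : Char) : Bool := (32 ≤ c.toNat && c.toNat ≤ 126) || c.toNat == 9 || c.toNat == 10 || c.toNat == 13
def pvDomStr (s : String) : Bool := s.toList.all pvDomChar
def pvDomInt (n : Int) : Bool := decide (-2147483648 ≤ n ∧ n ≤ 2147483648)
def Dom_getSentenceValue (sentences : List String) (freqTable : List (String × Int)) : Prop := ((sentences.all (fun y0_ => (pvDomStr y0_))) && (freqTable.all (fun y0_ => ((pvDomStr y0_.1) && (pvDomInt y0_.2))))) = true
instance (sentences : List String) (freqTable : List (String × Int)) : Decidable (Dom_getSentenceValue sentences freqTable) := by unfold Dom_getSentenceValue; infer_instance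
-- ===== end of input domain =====

-- B builds an occurrence-count dict of the sentences, then handles each DISTINCT
-- sentence once (one lowering, one table scan, one dict store of count*sum)
-- instead of A's per-occurrence per-word dict updates; return value proved equal.

-- ===== PORT A =====
def getSentenceValue (sentences : List String) (freqTable : List (String × Int)) : List (String × Int) :=
  (sentences.foldl (fun sentenceValue sentence =>
      freqTable.foldl (fun sentenceValue wf =>
          if PySem.Str.isIn wf.1 (PySem.Str.lower sentence) then
            if sentenceValue.contains sentence then
              sentenceValue.modify sentence 0 (· + wf.2)
            else
              sentenceValue.insert sentence wf.2
          else sentenceValue)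
        sentenceValue)
    PySem.Dict.empty).items

-- ===== PORT B =====
def getSentenceValue_alt (sentences : List String) (freqTable : List (String × Int)) : List (String × Int) :=
  let counts : PySem.Dict String Int :=
    sentences.foldl (fun counts s => counts.insert s (counts.getD s 0 + 1)) PySem.Dict.empty
  (counts.items.foldl (fun sentenceValue (sc : String × Int) =>
      if !(((freqTable.filter (fun wf => PySem.Str.isIn wf.1 (PySem.Str.lower sc.1))).map (·.2)).isEmpty)
      then sentenceValue.insert sc.1 ((((freqTable.filter (fun wf => PySem.Str.isIn wf.1 (PySem.Str.lower sc.1))).map (·.2))).sum * sc.2)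
      else sentenceValue)
    PySem.Dict.empty).items

-- ===== PRECONDITION & SPEC =====
def Spec_getSentenceValue (sentences : List String) (freqTable : List (String × Int)) (out : List (String × Int)) : Prop := out = getSentenceValue_alt sentences freqTable
instance (sentences : List String) (freqTable : List (String × Int)) (out : List (String × Int)) : Decidable (Spec_getSentenceValue sentences freqTable out) := by unfold Spec_getSentenceValue; infer_instance

-- ===== CLAIM (what is proved, stated in full; the proofs are below) =====
def Claim_equal_getSentenceValue : Prop := ∀ (sentences : List String) (freqTable : List (String × Int)), Dom_getSentenceValue sentences freqTable → Spec_getSentenceValue sentences freqTable (getSentenceValue sentences freqTable)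

-- ===== LEMMAS AND PROOFS =====
-- the word-match predicate, the matched frequencies and their sum, for one sentence
def pvHit (ft : List (String × Int)) (s : String) : Bool :=
  ft.any (fun wf => PySem.Str.isIn wf.1 (PySem.Str.lower s))
def pvM (ft : List (String × Int)) (s : String) : Int :=
  ((ft.filter (fun wf => PySem.Str.isIn wf.1 (PySem.Str.lower s))).map (·.2)).sum
-- the common normal form both programs are reduced to: from the sentence-count
-- items, keep the sentences with a match and scale the matched sum by the count
def pvF (ft : List (String × Int)) (l : List (String × Int)) : List (String × Int) :=
  (l.filter (fun q => pvHit ft q.1)).map (fun q => (q.1, pvM ft q.1 * q.2))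

theorem pv_insert_insert_self {κ ν : Type} [BEq κ] [LawfulBEq κ]
    (d : PySem.Dict κ ν) (k : κ) (a b : ν) :
    (d.insert k a).insert k b = d.insert k b := by
  apply PySem.Dict.ext
  rw [PySem.Dict.items_insert_of_contains _ b (PySem.Dict.contains_insert_self d k a)]
  by_cases hc : d.contains k = true
  · rw [PySem.Dict.items_insert_of_contains _ a hc, PySem.Dict.items_insert_of_contains _ b hc,
      List.map_map]
    refine List.map_congr_left ?_
    intro p _
    by_cases hp : p.1 == k
    · simp [hp]
    · simp [Function.comp, hp]
  · rw [PySem.Dict.items_insert_of_not_contains _ a (by simpa using hc),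
      PySem.Dict.items_insert_of_not_contains _ b (by simpa using hc)]
    simp only [PySem.Dict.contains, List.any_eq_true, not_exists] at hc
    rw [List.map_append]
    congr 1
    · conv_rhs => rw [← List.map_id d.items]
      refine List.map_congr_left ?_
      intro p hp
      have : (p.1 == k) = false := by
        by_contra h
        exact hc p ⟨hp, by simpa using h⟩
      simp [this]
    · simp

theorem pv_innerA (ft : List (String × Int)) (s : String) (sv : PySem.Dict String Int) :
    ft.foldl (fun sv wf =>
        if PySem.Str.isIn wf.1 (PySem.Str.lower s) then
          if sv.contains s then sv.modify s 0 (· + wf.2) else sv.insert s wf.2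
        else sv) sv
    = if pvHit ft s then sv.insert s (sv.getD s 0 + pvM ft s) else sv := by
  induction ft generalizing sv with
  | nil => simp [pvHit]
  | cons wf t ih =>
    by_cases hp : PySem.Str.isIn wf.1 (PySem.Str.lower s) = true
    · -- first step matches: state becomes sv.insert s (sv.getD s 0 + wf.2)
      have hstep : (if sv.contains s then sv.modify s 0 (· + wf.2) else sv.insert s wf.2)
          = sv.insert s (sv.getD s 0 + wf.2) := by
        by_cases hc : sv.contains s = true
        · simp [hc, PySem.Dict.modify]
        · rw [if_neg (by simp [hc]),
            PySem.Dict.getD_of_not_contains sv 0 (by simpa using hc)]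
          norm_num
      have hhit : pvHit (wf :: t) s = true := by
        simp only [pvHit, List.any_cons, hp, Bool.true_or]
      simp only [List.foldl_cons, hp, if_true, hstep, ih, hhit]
      by_cases ht : pvHit t s = true
      · rw [if_pos ht, PySem.Dict.getD_insert_self, pv_insert_insert_self]
        congr 1
        simp only [pvM, List.filter_cons, hp, if_true, List.map_cons, List.sum_cons]
        ring
      · rw [if_neg ht]
        congr 1
        have htf : pvHit t s = false := by simpa using ht
        have hfil : t.filter (fun wf => PySem.Str.isIn wf.1 (PySem.Str.lower s)) = [] := by
          rw [List.filter_eq_nil_iff]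
          intro q hq
          simp only [pvHit] at htf
          simpa using (List.any_eq_false.mp htf) q hq
        simp only [pvM, List.filter_cons, hp, if_true, hfil, List.map_cons, List.map_nil,
          List.sum_cons, List.sum_nil, add_zero]
    · have hpf : PySem.Str.isIn wf.1 (PySem.Str.lower s) = false := by simpa using hp
      have hh : pvHit (wf :: t) s = pvHit t s := by
        simp only [pvHit, List.any_cons, hpf, Bool.false_or]
      have hm : pvM (wf :: t) s = pvM t s := by
        simp only [pvM, List.filter_cons, hpf, Bool.false_eq_true, if_false]
      simp only [List.foldl_cons, hpf, Bool.false_eq_true, if_false, ih, hh, hm]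

theorem pv_F_map_false (ft : List (String × Int)) (s : String) (v : Int)
    (h : pvHit ft s = false) (l : List (String × Int)) :
    pvF ft (l.map (fun p => if p.1 == s then (s, v) else p)) = pvF ft l := by
  induction l with
  | nil => rfl
  | cons q t ih =>
    by_cases hqs : q.1 = s
    · simp only [pvF, List.map_cons, List.filter_cons, beq_iff_eq, hqs, if_true, h] at ih ⊢
      simpa using ih
    · by_cases hh : pvHit ft q.1 = true
      · simp only [pvF, List.map_cons, List.filter_cons, beq_iff_eq, hqs, if_false, hh] at ih ⊢
        simpa using ih
      · simp only [pvF, List.map_cons, List.filter_cons, beq_iff_eq, hqs, if_false] at ih ⊢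
        simp only [Bool.not_eq_true] at hh
        simpa [hh] using ih

theorem pv_F_map_true (ft : List (String × Int)) (s : String) (v : Int)
    (h : pvHit ft s = true) (l : List (String × Int)) :
    pvF ft (l.map (fun p => if p.1 == s then (s, v) else p))
      = (pvF ft l).map (fun q => if q.1 == s then (s, pvM ft s * v) else q) := by
  induction l with
  | nil => rfl
  | cons q t ih =>
    by_cases hqs : q.1 = s
    · simp only [pvF, List.map_cons, List.filter_cons, beq_iff_eq, hqs, if_true, h] at ih ⊢
      simpa [h, hqs] using ih
    · by_cases hh : pvHit ft q.1 = true
      · simp only [pvF, List.map_cons, List.filter_cons, beq_iff_eq, hqs, if_false, hh] at ih ⊢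
        simpa [hqs] using ih
      · simp only [pvF, List.map_cons, List.filter_cons, beq_iff_eq, hqs, if_false] at ih ⊢
        simp only [Bool.not_eq_true] at hh
        simpa [hh] using ih

theorem pv_F_append (ft : List (String × Int)) (l : List (String × Int)) (q : String × Int) :
    pvF ft (l ++ [q]) = pvF ft l ++ (if pvHit ft q.1 then [(q.1, pvM ft q.1 * q.2)] else []) := by
  simp only [pvF, List.filter_append, List.map_append]
  by_cases hh : pvHit ft q.1 <;> simp [hh]

theorem pv_isEmpty_matched (ft : List (String × Int)) (s : String) :
    (!(((ft.filter (fun wf => PySem.Str.isIn wf.1 (PySem.Str.lower s))).map (·.2)).isEmpty))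
      = pvHit ft s := by
  induction ft with
  | nil => rfl
  | cons wf t ih =>
    by_cases hp : PySem.Str.isIn wf.1 (PySem.Str.lower s) = true
    · simp only [List.filter_cons, hp, if_true, List.map_cons, List.isEmpty_cons,
        Bool.not_false, pvHit, List.any_cons, Bool.true_or]
    · have hpf : PySem.Str.isIn wf.1 (PySem.Str.lower s) = false := by simpa using hp
      simp only [List.filter_cons, hpf, Bool.false_eq_true, if_false, pvHit, List.any_cons,
        Bool.false_or]
      simpa only [pvHit] using ih

theorem pv_render (ft : List (String × Int)) (l : List (String × Int))
    (r : PySem.Dict String Int)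
    (hfresh : ∀ q ∈ l, r.contains q.1 = false) (hnd : (l.map (·.1)).Nodup) :
    (l.foldl (fun sv (sc : String × Int) =>
        if !(((ft.filter (fun wf => PySem.Str.isIn wf.1 (PySem.Str.lower sc.1))).map (·.2)).isEmpty)
        then sv.insert sc.1 ((((ft.filter (fun wf => PySem.Str.isIn wf.1 (PySem.Str.lower sc.1))).map (·.2))).sum * sc.2)
        else sv) r).items
      = r.items ++ pvF ft l := by
  induction l generalizing r with
  | nil => simp [pvF]
  | cons q t ih =>
    rw [List.map_cons] at hnd
    have hnd' : (t.map (·.1)).Nodup := (List.nodup_cons.mp hnd).2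
    have hqt : q.1 ∉ t.map (·.1) := (List.nodup_cons.mp hnd).1
    rw [List.foldl_cons]
    by_cases hh : pvHit ft q.1 = true
    · have hcond : (!(((ft.filter (fun wf => PySem.Str.isIn wf.1 (PySem.Str.lower q.1))).map (·.2)).isEmpty)) = true := by
        rw [pv_isEmpty_matched]; exact hh
      simp only [hcond, if_true]
      rw [ih _ ?_ hnd']
      · rw [PySem.Dict.items_insert_of_not_contains _ _ (hfresh q (List.mem_cons_self))]
        have hcons : pvF ft (q :: t) = (q.1, pvM ft q.1 * q.2) :: pvF ft t := by
          simp only [pvF, List.filter_cons, hh, if_true, List.map_cons]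
        rw [hcons, List.append_assoc]
        rfl
      · intro p hp
        rw [PySem.Dict.contains_insert]
        have h1 : (p.1 == q.1) = false := by
          simp only [beq_eq_false_iff_ne, ne_eq]
          intro he
          exact hqt (by simpa [← he] using List.mem_map_of_mem (f := (·.1)) hp)
        rw [h1, hfresh p (List.mem_cons_of_mem _ hp), Bool.or_self]
    · have hf : pvHit ft q.1 = false := by simpa using hh
      have hcond : (!(((ft.filter (fun wf => PySem.Str.isIn wf.1 (PySem.Str.lower q.1))).map (·.2)).isEmpty)) = false := by
        rw [pv_isEmpty_matched]; exact hf
      simp only [hcond, Bool.false_eq_true, if_false]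
      rw [ih _ (fun p hp => hfresh p (List.mem_cons_of_mem _ hp)) hnd']
      have hskip : pvF ft (q :: t) = pvF ft t := by
        simp only [pvF, List.filter_cons, hf, Bool.false_eq_true, if_false]
      rw [hskip]

theorem pv_keys_F (ft : List (String × Int)) (l : List (String × Int)) :
    (pvF ft l).map (·.1) = (l.filter (fun q => pvHit ft q.1)).map (·.1) := by
  simp [pvF, List.map_map, Function.comp]

theorem pv_main (ft : List (String × Int)) (ss : List String) :
    (ss.foldl (fun sentenceValue sentence =>
        ft.foldl (fun sentenceValue wf =>
            if PySem.Str.isIn wf.1 (PySem.Str.lower sentence) then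
              if sentenceValue.contains sentence then
                sentenceValue.modify sentence 0 (· + wf.2)
              else sentenceValue.insert sentence wf.2
            else sentenceValue)
          sentenceValue)
      PySem.Dict.empty).items
    = pvF ft ((ss.foldl (fun counts s => counts.insert s (counts.getD s 0 + 1)) PySem.Dict.empty).items) := by
  induction ss using List.reverseRecOn with
  | nil => rfl
  | append_singleton ss s ih =>
    rw [List.foldl_concat, List.foldl_concat, pv_innerA]
    set c : PySem.Dict String Int := ss.foldl (fun counts s => counts.insert s (counts.getD s 0 + 1)) PySem.Dict.empty with hc
    set d := ss.foldl (fun sentenceValue sentence =>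
        ft.foldl (fun sentenceValue wf =>
            if PySem.Str.isIn wf.1 (PySem.Str.lower sentence) then
              if sentenceValue.contains sentence then
                sentenceValue.modify sentence 0 (· + wf.2)
              else sentenceValue.insert sentence wf.2
            else sentenceValue)
          sentenceValue)
      PySem.Dict.empty with hd
    have hck : c.keys.Nodup := by
      rw [hc, PySem.Dict.keys_foldl_insert, PySem.Dict.keys_empty, PySem.Set.update_nil_left]
      exact PySem.Set.nodup_ofList ss
    by_cases hh : pvHit ft s = true
    · rw [if_pos hh]
      by_cases hcc : c.contains s = true
      · -- s already counted: both sides update in place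
        obtain ⟨p, hpmem, hps⟩ := List.any_eq_true.mp hcc
        have hps' : p.1 = s := by simpa using hps
        obtain ⟨v, hv⟩ : ∃ v, (s, v) ∈ c.items := ⟨p.2, by rwa [← hps']⟩
        have hgetc : c.getD s 0 = v := by
          rw [PySem.Dict.getD, PySem.Dict.get?_of_mem_items c hv hck]; rfl
        have hmemd : (s, pvM ft s * v) ∈ d.items := by
          rw [ih]
          exact List.mem_map.mpr ⟨(s, v), List.mem_filter.mpr ⟨hv, hh⟩, rfl⟩
        have hdk : d.keys.Nodup := by
          show (d.items.map (·.1)).Nodup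
          rw [ih, pv_keys_F]
          have hsub : (List.filter (fun q => pvHit ft q.1) c.items).Sublist c.items :=
            List.filter_sublist
          have hck' : (c.items.map (fun x => x.1)).Nodup := hck
          exact (List.Sublist.map (fun x => x.1) hsub).nodup hck'
        have hdc : d.contains s = true :=
          List.any_eq_true.mpr ⟨(s, pvM ft s * v), hmemd, by simp⟩
        have hgetd : d.getD s 0 = pvM ft s * v := by
          rw [PySem.Dict.getD, PySem.Dict.get?_of_mem_items d hmemd hdk]; rfl
        rw [PySem.Dict.items_insert_of_contains _ _ hdc,
          PySem.Dict.items_insert_of_contains _ _ hcc, ih,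
          hgetd, hgetc, pv_F_map_true ft s (v + 1) hh]
        have : pvM ft s * v + pvM ft s = pvM ft s * (v + 1) := by ring
        rw [this]
      · -- new sentence with a match: both sides append
        have hccf : c.contains s = false := by simpa using hcc
        have hdcf : d.contains s = false := by
          rw [Bool.eq_false_iff]
          intro hany
          obtain ⟨q, hq, hqs⟩ := List.any_eq_true.mp hany
          rw [ih] at hq
          obtain ⟨p, hp, hpq⟩ := List.mem_map.mp hq
          apply Bool.eq_false_iff.mp hccf
          exact List.any_eq_true.mpr ⟨p, (List.mem_filter.mp hp).1,
            by simpa [← hpq] using hqs⟩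
        rw [PySem.Dict.items_insert_of_not_contains _ _ hdcf,
          PySem.Dict.items_insert_of_not_contains _ _ hccf,
          PySem.Dict.getD_of_not_contains _ _ hdcf,
          PySem.Dict.getD_of_not_contains _ _ hccf,
          pv_F_append, if_pos hh, ih]
        norm_num
    · -- no match for s: A leaves the dict alone, the count change is filtered out
      rw [if_neg hh]
      have hhf : pvHit ft s = false := by simpa using hh
      by_cases hcc : c.contains s = true
      · rw [PySem.Dict.items_insert_of_contains _ _ hcc, pv_F_map_false ft s _ hhf, ih]
      · rw [PySem.Dict.items_insert_of_not_contains _ _ (by simpa using hcc),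
          pv_F_append, if_neg hh, List.append_nil, ih]


-- ===== VERDICT (by name: the statement is the Claim_ definition above) =====
theorem getSentenceValue_spec : Claim_equal_getSentenceValue := by
  intro sentences freqTable _
  unfold Spec_getSentenceValue getSentenceValue getSentenceValue_alt
  rw [pv_main]
  have hck : (sentences.foldl (fun counts s => counts.insert s (counts.getD s 0 + 1))
      (PySem.Dict.empty (κ := String) (ν := Int))).keys.Nodup := by
    rw [PySem.Dict.keys_foldl_insert, PySem.Dict.keys_empty, PySem.Set.update_nil_left]
    exact PySem.Set.nodup_ofList sentences
  rw [pv_render freqTable _ PySem.Dict.empty (fun q _ => rfl) hck]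
  rfl
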